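-- pv_equiv track=rewrite | github.com/bsuraj23/tenthirty | file5interview .py | filter_numbers
-- ===== SOURCE A (Python) =====
-- def filter_numbers(numbers):
--     result = []
--     for num in numbers:
--         if num < 0:        # break if negative
--             break
--         if num % 3 == 0:   # skip multiples of 3
--             continue
--         result.append(num)
--     return result
-- ===== SOURCE B (Python) =====
-- def filter_numbers(numbers):
--     # Staged passes: first locate the cut point (index of the first negative,
--     # or len if none), then slice the prefix and filter out multiples of 3.
--     cut = next((i for i, x in enumerate(numbers) if x < 0), len(numbers))
--     return [x for x in numbers[:cut] if x % 3 != 0]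
-- ===== Notes on version B (the rewrite author's own statement) =====
-- stated objective: alternative
-- what changed: Replaces A's single accumulator loop with break/continue by staged passes: an index search computes the cut point at the first negative, the list is sliced at that index, and a separate filter pass drops multiples of 3.
import Mathlib
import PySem

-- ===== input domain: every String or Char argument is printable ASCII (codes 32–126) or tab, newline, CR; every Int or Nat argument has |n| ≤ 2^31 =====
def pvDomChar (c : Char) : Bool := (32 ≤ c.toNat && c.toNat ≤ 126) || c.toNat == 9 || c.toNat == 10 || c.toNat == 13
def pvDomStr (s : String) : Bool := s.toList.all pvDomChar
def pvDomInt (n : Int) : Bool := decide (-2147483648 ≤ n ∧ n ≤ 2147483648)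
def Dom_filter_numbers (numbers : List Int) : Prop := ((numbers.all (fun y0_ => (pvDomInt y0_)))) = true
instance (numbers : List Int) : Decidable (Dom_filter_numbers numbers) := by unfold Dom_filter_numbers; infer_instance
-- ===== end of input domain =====

-- B replaces A's break-and-continue accumulator loop by staged passes: find the
-- cut index at the first negative, slice the prefix, then filter multiples of 3.

-- ===== PORT A =====
-- A's loop: break on negative, skip multiples of 3, append otherwise.
def filterNumbersLoop (result : List Int) : List Int → List Int
  | [] => result
  | num :: rest =>
      if num < 0 then result
      else if PySem.Int.mod num 3 == 0 then filterNumbersLoop result rest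
      else filterNumbersLoop (result ++ [num]) rest

def filter_numbers (numbers : List Int) : List Int :=
  filterNumbersLoop [] numbers

-- ===== PORT B =====
-- next((i for i, x in enumerate(numbers) if x < 0), len(numbers))
def findNegIdx : List Int → Nat
  | [] => 0
  | x :: rest => if x < 0 then 0 else findNegIdx rest + 1

-- numbers[:cut] with 0 ≤ cut ≤ len is exactly List.take cut
def filter_numbers_alt (numbers : List Int) : List Int :=
  (numbers.take (findNegIdx numbers)).filter (fun n => !(PySem.Int.mod n 3 == 0))

-- ===== PRECONDITION & SPEC =====
def Spec_filter_numbers (numbers : List Int) (out : List Int) : Prop := out = filter_numbers_alt numbers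
instance (numbers : List Int) (out : List Int) : Decidable (Spec_filter_numbers numbers out) := by unfold Spec_filter_numbers; infer_instance

-- ===== CLAIM (what is proved, stated in full; the proofs are below) =====
def Claim_equal_filter_numbers : Prop := ∀ (numbers : List Int), Dom_filter_numbers numbers → Spec_filter_numbers numbers (filter_numbers numbers)

-- ===== LEMMAS AND PROOFS =====

theorem filterNumbersLoop_eq (l : List Int) (acc : List Int) :
    filterNumbersLoop acc l =
      acc ++ (l.take (findNegIdx l)).filter (fun n => !(PySem.Int.mod n 3 == 0)) := by
  induction l generalizing acc with
  | nil => simp [filterNumbersLoop, findNegIdx]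
  | cons num rest ih =>
      by_cases h : num < 0
      · simp [filterNumbersLoop, findNegIdx, h]
      · by_cases hm : PySem.Int.mod num 3 == 0
        all_goals
          simp only [filterNumbersLoop, findNegIdx, h, if_false, hm, if_true, ih,
            List.take_succ_cons, List.filter_cons]
          split_ifs <;> simp_all [PySem.Int.mod]

-- ===== VERDICT (by name: the statement is the Claim_ definition above) =====
theorem filter_numbers_spec : Claim_equal_filter_numbers := by
  intro numbers _
  unfold Spec_filter_numbers filter_numbers filter_numbers_alt
  exact filterNumbersLoop_eq numbers []
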